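-- pv_equiv track=rewrite | github.com/1r00t/qr-gen | utils/pattern_mask.py | generate_qr_code_mask
-- ===== SOURCE A (Python) =====
-- from itertools import product
--
-- def generate_qr_code_mask(version):
--     size = version * 4 + 17  # Calculate the size of the QR code matrix
--     mask = [[0] * size for _ in range(size)]  # Initialize the matrix with all zeros
--
--     # Add the finder patterns
--     _add_finder_pattern(mask, 0, 0)
--     _add_finder_pattern(mask, size - 7, 0)
--     _add_finder_pattern(mask, 0, size - 7)
--
--     # Add the alignment patterns
--     if version >= 2:
--         alignment_coords = _get_alignment_positions(version)
--         for coord in alignment_coords: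
--             _add_alignment_pattern(mask, coord[0], coord[1])
--
--     return mask
--
-- def _is_alignment_within_finder(pos, qr_size):
--     x, y = pos
--     finder_positions = [(0, 0), (0, qr_size - 7), (qr_size - 7, 0)]
--     alignment_size = 5
--
--     for fp_x, fp_y in finder_positions:
--         if any(
--             (x + i, y + j)
--             in [(fp_x + dx, fp_y + dy) for dx in range(7) for dy in range(7)]
--             for i in range(alignment_size)
--             for j in range(alignment_size)
--         ):
--             return False
--
--     return True
--
-- def _get_alignment_positions(version):
--     positions = []
--     if version > 1:
--         n_patterns = version // 7 + 2
--         first_pos = 6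
--         positions.append(first_pos)
--         matrix_width = 17 + 4 * version
--         last_pos = matrix_width - 1 - first_pos
--         second_last_pos = (
--             (first_pos + last_pos * (n_patterns - 2) + (n_patterns - 1) // 2)
--             // (n_patterns - 1)
--         ) & -2
--         pos_step = last_pos - second_last_pos
--         second_pos = last_pos - (n_patterns - 2) * pos_step
--         positions.extend(range(second_pos, last_pos + 1, pos_step))
--     positions = list(product(positions, repeat=2))
--     positions_clean = []
--     for position in positions:
--         if _is_alignment_within_finder(position, matrix_width):
--             positions_clean.append(position)
--     return positions_clean
--
-- def _add_finder_pattern(mask, x, y):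
--     for i in range(7):
--         mask[x + i][y] = 1
--         mask[x + i][y + 6] = 1
--         mask[x][y + i] = 1
--         mask[x + 6][y + i] = 1
--
--     for i in range(2, 5):
--         for j in range(2, 5):
--             mask[x + i][y + j] = 1
--
-- def _add_alignment_pattern(mask, x, y):
--     x = x - 2
--     y = y - 2
--     alignment_pattern = [
--         [1, 1, 1, 1, 1],
--         [1, 0, 0, 0, 1],
--         [1, 0, 1, 0, 1],
--         [1, 0, 0, 0, 1],
--         [1, 1, 1, 1, 1],
--     ]
--
--     for i in range(5):
--         for j in range(5):
--             mask[x + i][y + j] = alignment_pattern[i][j]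
-- ===== SOURCE B (Python) =====
-- _PATTERN = [
--     [1, 1, 1, 1, 1],
--     [1, 0, 0, 0, 1],
--     [1, 0, 1, 0, 1],
--     [1, 0, 0, 0, 1],
--     [1, 1, 1, 1, 1],
-- ]
--
-- def _alignment_centers(version, size):
--     # Same coordinate formula and the same finder-overlap filter as A,
--     # but the overlap test is interval arithmetic instead of building and
--     # scanning 7x7 coordinate lists.
--     coords = []
--     if version > 1:
--         n_patterns = version // 7 + 2
--         coords.append(6)
--         last_pos = size - 7
--         second_last_pos = (
--             (6 + last_pos * (n_patterns - 2) + (n_patterns - 1) // 2)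
--             // (n_patterns - 1)
--         ) & -2
--         pos_step = last_pos - second_last_pos
--         second_pos = last_pos - (n_patterns - 2) * pos_step
--         coords.extend(range(second_pos, last_pos + 1, pos_step))
--     finders = [(0, 0), (0, size - 7), (size - 7, 0)]
--     return [
--         (x, y)
--         for x in coords
--         for y in coords
--         if not any(
--             fx - 4 <= x <= fx + 6 and fy - 4 <= y <= fy + 6 for fx, fy in finders
--         )
--     ]
--
-- def generate_qr_code_mask(version):
--     if version < 1:
--         raise ValueError("invalid QR code version")
--     size = version * 4 + 17
--     # overlay: cell -> alignment-pattern value; a later square overwrites an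
--     # earlier one on their (all-ones) shared border cells
--     overlay = {}
--     if version >= 2:
--         for cx, cy in _alignment_centers(version, size):
--             for di in range(5):
--                 for dj in range(5):
--                     overlay[(cx - 2 + di, cy - 2 + dj)] = _PATTERN[di][dj]
--     finders = [(0, 0), (size - 7, 0), (0, size - 7)]
--
--     def cell(i, j):
--         v = overlay.get((i, j))
--         if v is not None:
--             return v
--         for fx, fy in finders:
--             di, dj = i - fx, j - fy
--             if 0 <= di <= 6 and 0 <= dj <= 6:
--                 if di in (0, 6) or dj in (0, 6) or (2 <= di <= 4 and 2 <= dj <= 4):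
--                     return 1
--         return 0
--
--     return [[cell(i, j) for j in range(size)] for i in range(size)]
-- ===== Notes on version B (the rewrite author's own statement) =====
-- stated objective: alternative
-- what changed: A stamps finder/alignment patterns into a mutable zero grid and filters alignment candidates by scanning materialised 7x7 coordinate lists; B validates the version, computes the same centers with an interval-arithmetic overlap filter, builds a cell->value overlay dictionary for the alignment squares once, and constructs the matrix purely per cell by classifying each (i,j) (overlay value, else finder-pattern rule, else 0).
import Mathlib
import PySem

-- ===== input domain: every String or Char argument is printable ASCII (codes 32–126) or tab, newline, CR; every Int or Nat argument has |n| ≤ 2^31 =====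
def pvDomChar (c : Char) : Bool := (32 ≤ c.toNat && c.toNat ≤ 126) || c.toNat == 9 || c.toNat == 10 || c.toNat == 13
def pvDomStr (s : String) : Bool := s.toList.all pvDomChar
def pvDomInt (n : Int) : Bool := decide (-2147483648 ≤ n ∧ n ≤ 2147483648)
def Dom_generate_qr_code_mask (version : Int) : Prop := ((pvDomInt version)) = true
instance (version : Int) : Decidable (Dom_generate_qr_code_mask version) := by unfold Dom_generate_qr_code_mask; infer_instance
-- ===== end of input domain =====

-- B replaces A's stamp-into-a-zero-grid mutation by a pure per-cell construction:
-- after validating the version, the alignment squares become a cell→value overlay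
-- dictionary (built once, with the same coordinate formula, but an interval-arithmetic
-- overlap filter instead of A's scan of materialised 7x7 coordinate lists) and
-- every cell is then classified directly (overlay value, else finder-pattern rule,
-- else 0).  Objective: alternative.

-- ===== PORT A =====

-- mask[i][j] = v : fetch row i, assign row[j], write the row back.  pySetD/pyGetD are
-- exact where the indices are in range (always the case under Pre_; Python raises
-- IndexError outside, and those inputs are excluded by Pre_).
def pvSet2 (m : List (List Int)) (i j v : Int) : List (List Int) :=
  PySem.List.pySetD m i (PySem.List.pySetD (PySem.List.pyGetD m i []) j v)

-- the 5×5 alignment pattern literal (shared verbatim by both Pythons)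
def pvAlignPattern : List (List Int) :=
  [[1, 1, 1, 1, 1], [1, 0, 0, 0, 1], [1, 0, 1, 0, 1], [1, 0, 0, 0, 1], [1, 1, 1, 1, 1]]

def pvAddFinderPattern (mask : List (List Int)) (x y : Int) : List (List Int) :=
  let mask := (PySem.List.pyRange 0 7 1).foldl (fun m i =>
    let m := pvSet2 m (x + i) y 1
    let m := pvSet2 m (x + i) (y + 6) 1
    let m := pvSet2 m x (y + i) 1
    pvSet2 m (x + 6) (y + i) 1) mask
  (PySem.List.pyRange 2 5 1).foldl (fun m i =>
    (PySem.List.pyRange 2 5 1).foldl (fun m j => pvSet2 m (x + i) (y + j) 1) m) mask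

def pvAddAlignmentPattern (mask : List (List Int)) (x y : Int) : List (List Int) :=
  let x := x - 2
  let y := y - 2
  (PySem.List.pyRange 0 5 1).foldl (fun m i =>
    (PySem.List.pyRange 0 5 1).foldl (fun m j =>
      pvSet2 m (x + i) (y + j)
        (PySem.List.pyGetD (PySem.List.pyGetD pvAlignPattern i []) j 0)) m) mask

def pvIsAlignmentWithinFinder (pos : Int × Int) (qrSize : Int) : Bool :=
  let finderPositions : List (Int × Int) := [(0, 0), (0, qrSize - 7), (qrSize - 7, 0)]
  -- 'for fp in finder_positions: if any(…): return False' then 'return True'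
  !(finderPositions.any (fun fp =>
    (PySem.List.pyRange 0 5 1).any (fun i =>
      (PySem.List.pyRange 0 5 1).any (fun j =>
        decide ((pos.1 + i, pos.2 + j) ∈
          (PySem.List.pyRange 0 7 1).flatMap (fun dx =>
            (PySem.List.pyRange 0 7 1).map (fun dy => (fp.1 + dx, fp.2 + dy))))))))

-- when version ≤ 1 Python's positions list stays empty, so product([],repeat=2) = []
-- and the filter loop never runs (matrix_width is never read): the result is [].
def pvGetAlignmentPositions (version : Int) : List (Int × Int) :=
  if version > 1 then
    let nPatterns := PySem.Int.floordiv version 7 + 2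
    let firstPos : Int := 6
    let matrixWidth := 17 + 4 * version
    let lastPos := matrixWidth - 1 - firstPos
    let secondLastPos := PySem.Int.band
      (PySem.Int.floordiv (firstPos + lastPos * (nPatterns - 2) + PySem.Int.floordiv (nPatterns - 1) 2)
        (nPatterns - 1)) (-2)
    let posStep := lastPos - secondLastPos
    let secondPos := lastPos - (nPatterns - 2) * posStep
    let positions : List Int := [firstPos] ++ PySem.List.pyRange secondPos (lastPos + 1) posStep
    let prod := positions.flatMap (fun a => positions.map (fun b => (a, b)))
    prod.foldl (fun acc p => if pvIsAlignmentWithinFinder p matrixWidth then acc ++ [p] else acc) []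
  else []

def generate_qr_code_mask (version : Int) : List (List Int) :=
  let size := version * 4 + 17
  let mask : List (List Int) := List.replicate size.toNat (List.replicate size.toNat 0)
  let mask := pvAddFinderPattern mask 0 0
  let mask := pvAddFinderPattern mask (size - 7) 0
  let mask := pvAddFinderPattern mask 0 (size - 7)
  if version ≥ 2 then
    (pvGetAlignmentPositions version).foldl (fun m c => pvAddAlignmentPattern m c.1 c.2) mask
  else mask

-- ===== PORT B =====

def pvAlignmentCenters (version size : Int) : List (Int × Int) :=
  let coords : List Int :=
    if version > 1 then
      let nPatterns := PySem.Int.floordiv version 7 + 2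
      let lastPos := size - 7
      let secondLastPos := PySem.Int.band
        (PySem.Int.floordiv (6 + lastPos * (nPatterns - 2) + PySem.Int.floordiv (nPatterns - 1) 2)
          (nPatterns - 1)) (-2)
      let posStep := lastPos - secondLastPos
      let secondPos := lastPos - (nPatterns - 2) * posStep
      6 :: PySem.List.pyRange secondPos (lastPos + 1) posStep
    else []
  let finders : List (Int × Int) := [(0, 0), (0, size - 7), (size - 7, 0)]
  coords.flatMap (fun x =>
    (coords.filter (fun y => !(finders.any (fun fp =>
      decide (fp.1 - 4 ≤ x ∧ x ≤ fp.1 + 6 ∧ fp.2 - 4 ≤ y ∧ y ≤ fp.2 + 6))))).map (fun y => (x, y)))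

def generate_qr_code_mask_alt (version : Int) : List (List Int) :=
  if version < 1 then []  -- Source B raises ValueError here; excluded by Pre_
  else
    let size := version * 4 + 17
    let overlay : PySem.Dict (Int × Int) Int :=
      if version ≥ 2 then
        (pvAlignmentCenters version size).foldl (fun d c =>
          (PySem.List.pyRange 0 5 1).foldl (fun d di =>
            (PySem.List.pyRange 0 5 1).foldl (fun d dj =>
              d.insert (c.1 - 2 + di, c.2 - 2 + dj)
                (PySem.List.pyGetD (PySem.List.pyGetD pvAlignPattern di []) dj 0)) d) d)
          PySem.Dict.empty
      else PySem.Dict.empty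
    let finders : List (Int × Int) := [(0, 0), (size - 7, 0), (0, size - 7)]
    let cell : Int → Int → Int := fun i j =>
      match overlay.get? (i, j) with
      | some v => v
      | none =>
        match finders.find? (fun fp =>
          decide (0 ≤ i - fp.1 ∧ i - fp.1 ≤ 6 ∧ 0 ≤ j - fp.2 ∧ j - fp.2 ≤ 6 ∧
            (i - fp.1 = 0 ∨ i - fp.1 = 6 ∨ j - fp.2 = 0 ∨ j - fp.2 = 6 ∨
              (2 ≤ i - fp.1 ∧ i - fp.1 ≤ 4 ∧ 2 ≤ j - fp.2 ∧ j - fp.2 ≤ 4)))) with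
        | some _ => 1
        | none => 0
    (PySem.List.pyRange 0 size 1).map (fun i =>
      (PySem.List.pyRange 0 size 1).map (fun j => cell i j))

-- ===== PRECONDITION & SPEC =====

-- Pre_ admits the valid QR versions (≥ 1).  It excludes versions ≤ -3, on which A
-- raises IndexError, and the nonsense versions -2..0, on which A's returned grid is an
-- accident of overlapping out-of-range finder stamps while B raises ValueError: B's
-- own validation raises there, so those inputs are excluded rather than matched.
def Pre_generate_qr_code_mask (version : Int) : Prop := 1 ≤ version
instance (version : Int) : Decidable (Pre_generate_qr_code_mask version) := by
  unfold Pre_generate_qr_code_mask; infer_instance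

def pvWitness_generate_qr_code_mask : Int := 2

def Spec_generate_qr_code_mask (version : Int) (out : List (List Int)) : Prop :=
  out = generate_qr_code_mask_alt version
instance (version : Int) (out : List (List Int)) : Decidable (Spec_generate_qr_code_mask version out) := by
  unfold Spec_generate_qr_code_mask; infer_instance

-- ===== CLAIM (what is proved, stated in full; the proofs are below) =====
def Claim_equal_generate_qr_code_mask : Prop := ∀ (version : Int), Dom_generate_qr_code_mask version → Pre_generate_qr_code_mask version → Spec_generate_qr_code_mask version (generate_qr_code_mask version)

-- ===== LEMMAS AND PROOFS =====

-- matrix entry / rectangular-shape abstraction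
def pvG2 (m : List (List Int)) (p q : Nat) : Int := (m.getD p []).getD q 0

def pvRect (N : Nat) (m : List (List Int)) : Prop :=
  m.length = N ∧ ∀ p : Nat, p < N → (m.getD p []).length = N

def pvApplyW (m : List (List Int)) (ws : List (Int × Int × Int)) : List (List Int) :=
  ws.foldl (fun m w => pvSet2 m w.1 w.2.1 w.2.2) m

def pvHit (p q : Nat) (w : Int × Int × Int) : Bool := decide (((p : Int) = w.1 ∧ (q : Int) = w.2.1))

def pvInW (N : Nat) (ws : List (Int × Int × Int)) : Prop :=
  ∀ w ∈ ws, 0 ≤ w.1 ∧ w.1 < (N : Int) ∧ 0 ≤ w.2.1 ∧ w.2.1 < (N : Int)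

-- the write lists of A's stamping helpers
def pvFinderW (x y : Int) : List (Int × Int × Int) :=
  ((PySem.List.pyRange 0 7 1).flatMap (fun i =>
    [(x + i, y, (1 : Int)), (x + i, y + 6, 1), (x, y + i, 1), (x + 6, y + i, 1)]))
  ++ ((PySem.List.pyRange 2 5 1).flatMap (fun i =>
    (PySem.List.pyRange 2 5 1).map (fun j => (x + i, y + j, (1 : Int)))))

def pvAlignKV (c : Int × Int) : List ((Int × Int) × Int) :=
  (PySem.List.pyRange 0 5 1).flatMap (fun di =>
    (PySem.List.pyRange 0 5 1).map (fun dj =>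
      ((c.1 - 2 + di, c.2 - 2 + dj),
        PySem.List.pyGetD (PySem.List.pyGetD pvAlignPattern di []) dj 0)))

def pvToTriple (kv : (Int × Int) × Int) : Int × Int × Int := (kv.1.1, kv.1.2, kv.2)

abbrev pvFinderCond (x y i j : Int) : Prop :=
  0 ≤ i - x ∧ i - x ≤ 6 ∧ 0 ≤ j - y ∧ j - y ≤ 6 ∧
    (i - x = 0 ∨ i - x = 6 ∨ j - y = 0 ∨ j - y = 6 ∨
      (2 ≤ i - x ∧ i - x ≤ 4 ∧ 2 ≤ j - y ∧ j - y ≤ 4))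

-- the coordinate-formula intermediates (exactly the ports' let-bodies)
def pvNPat (version : Int) : Int := PySem.Int.floordiv version 7 + 2
def pvSLP (version last : Int) : Int :=
  PySem.Int.band
    (PySem.Int.floordiv (6 + last * (pvNPat version - 2) + PySem.Int.floordiv (pvNPat version - 1) 2)
      (pvNPat version - 1)) (-2)
def pvStepE (version last : Int) : Int := last - pvSLP version last
def pvSecondE (version last : Int) : Int := last - (pvNPat version - 2) * pvStepE version last

lemma pvGetD_set {α : Type} (l : List α) (n : Nat) (x d : α) (p : Nat) :
    (l.set n x).getD p d = if n = p ∧ n < l.length then x else l.getD p d := by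
  by_cases h1 : n = p
  · subst h1
    by_cases h2 : n < l.length
    · rw [List.getD_eq_getElem?_getD, List.getElem?_set, if_pos rfl, if_pos h2,
        if_pos ⟨rfl, h2⟩]
      rfl
    · rw [List.getD_eq_getElem?_getD, List.getElem?_set, if_pos rfl, if_neg h2,
        if_neg (by tauto), List.getD_eq_getElem?_getD, List.getElem?_eq_none (by omega)]
  · rw [List.getD_eq_getElem?_getD, List.getElem?_set, if_neg h1, if_neg (by tauto),
      ← List.getD_eq_getElem?_getD]

lemma pvRect_set2 (N : Nat) (m : List (List Int)) (i j v : Int) (hi : 0 ≤ i) (hj : 0 ≤ j)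
    (h : pvRect N m) : pvRect N (pvSet2 m i j v) := by
  obtain ⟨hlen, hrow⟩ := h
  unfold pvSet2
  rw [PySem.List.pySetD_of_nonneg _ _ hi, PySem.List.pySetD_of_nonneg _ _ hj]
  refine ⟨by simpa using hlen, ?_⟩
  intro p hp
  rw [pvGetD_set]
  split_ifs with hc
  · rw [List.length_set]
    have heq : PySem.List.pyGetD m i [] = m.getD i.toNat [] := by
      rw [PySem.List.pyGetD_eq_getElem m [] hi (by omega)]
      rw [List.getD_eq_getElem?_getD, List.getElem?_eq_getElem hc.2]
      rfl
    rw [heq]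
    exact hrow i.toNat (by omega)
  · exact hrow p hp

lemma pvG2_set2 (N : Nat) (m : List (List Int)) (a b v : Int) (h : pvRect N m)
    (ha : 0 ≤ a) (haN : a < (N : Int)) (hb : 0 ≤ b) (hbN : b < (N : Int)) (p q : Nat) :
    pvG2 (pvSet2 m a b v) p q = if (p : Int) = a ∧ (q : Int) = b then v else pvG2 m p q := by
  obtain ⟨hlen, hrow⟩ := h
  have ha' : a.toNat < m.length := by omega
  have hrowa : PySem.List.pyGetD m a [] = m.getD a.toNat [] := by
    rw [PySem.List.pyGetD_eq_getElem m [] ha (by omega)]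
    rw [List.getD_eq_getElem?_getD, List.getElem?_eq_getElem ha']
    rfl
  have hrl : (m.getD a.toNat []).length = N := hrow a.toNat (by omega)
  unfold pvSet2 pvG2
  rw [PySem.List.pySetD_of_nonneg _ _ ha, PySem.List.pySetD_of_nonneg _ _ hb]
  rw [pvGetD_set]
  by_cases hpa : (p : Int) = a
  · rw [if_pos ⟨by omega, ha'⟩, pvGetD_set]
    by_cases hqb : (q : Int) = b
    · rw [if_pos ⟨by omega, by rw [hrowa, hrl]; omega⟩, if_pos ⟨hpa, hqb⟩]
    · rw [if_neg (by rintro ⟨h1, _⟩; omega), hrowa,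
        if_neg (by rintro ⟨_, h2⟩; exact hqb h2)]
      rw [show a.toNat = p from by omega]
  · rw [if_neg (by rintro ⟨h1, _⟩; omega), if_neg (by rintro ⟨h1, _⟩; exact hpa h1)]

lemma pvRect_applyW (N : Nat) (ws : List (Int × Int × Int)) :
    ∀ m, pvRect N m → pvInW N ws → pvRect N (pvApplyW m ws) := by
  induction ws with
  | nil => intro m h _; exact h
  | cons w t ih =>
    intro m h hw
    have hw0 := hw w (by simp)
    exact ih _ (pvRect_set2 N m w.1 w.2.1 w.2.2 hw0.1 hw0.2.2.1 h)
      (fun x hx => hw x (by simp [hx]))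

lemma pvG2_applyW (N : Nat) (ws : List (Int × Int × Int)) :
    ∀ m, pvRect N m → pvInW N ws → ∀ p q : Nat,
      pvG2 (pvApplyW m ws) p q =
        (match ws.reverse.find? (pvHit p q) with
          | some w => w.2.2
          | none => pvG2 m p q) := by
  induction ws with
  | nil => intro m _ _ p q; rfl
  | cons w t ih =>
    intro m hR hw p q
    have hw0 := hw w (by simp)
    have hR' : pvRect N (pvSet2 m w.1 w.2.1 w.2.2) :=
      pvRect_set2 N m w.1 w.2.1 w.2.2 hw0.1 hw0.2.2.1 hR
    have hwt : pvInW N t := fun x hx => hw x (by simp [hx])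
    have := ih (pvSet2 m w.1 w.2.1 w.2.2) hR' hwt p q
    show pvG2 (pvApplyW (pvSet2 m w.1 w.2.1 w.2.2) t) p q = _
    rw [this]
    rw [List.reverse_cons, List.find?_append]
    cases hfind : t.reverse.find? (pvHit p q) with
    | some w' => simp
    | none =>
      simp only [Option.none_or]
      rw [pvG2_set2 N m w.1 w.2.1 w.2.2 hR hw0.1 hw0.2.1 hw0.2.2.1 hw0.2.2.2 p q]
      cases hfw : List.find? (pvHit p q) [w] with
      | some w' =>
        have hmem := List.mem_of_find?_eq_some hfw
        have hpred := List.find?_some hfw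
        simp only [List.mem_singleton] at hmem
        subst hmem
        unfold pvHit at hpred
        simp only [decide_eq_true_eq] at hpred
        simp [if_pos hpred]
      | none =>
        have : pvHit p q w = false := by
          have := List.find?_eq_none.mp hfw w (by simp)
          simpa using this
        unfold pvHit at this
        simp only [decide_eq_false_iff_not] at this
        simp [if_neg this]

lemma pvFoldl_flatMap {α β M : Type} (l : List α) (g : α → List β) (op : M → β → M) (m0 : M) :
    (l.flatMap g).foldl op m0 = l.foldl (fun m x => (g x).foldl op m) m0 := by
  induction l generalizing m0 with
  | nil => rfl
  | cons a t ih => simp [List.flatMap_cons, List.foldl_append, ih]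

lemma pvApplyW_append (m : List (List Int)) (a b : List (Int × Int × Int)) :
    pvApplyW m (a ++ b) = pvApplyW (pvApplyW m a) b := List.foldl_append

lemma pvAddFinder_eq (m : List (List Int)) (x y : Int) :
    pvAddFinderPattern m x y = pvApplyW m (pvFinderW x y) := by
  unfold pvAddFinderPattern pvFinderW pvApplyW
  dsimp only
  rw [List.foldl_append]
  rw [pvFoldl_flatMap, pvFoldl_flatMap]
  simp only [List.foldl_map]
  rfl

lemma pvAddAlign_eq (m : List (List Int)) (x y : Int) :
    pvAddAlignmentPattern m x y = pvApplyW m ((pvAlignKV (x, y)).map pvToTriple) := by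
  unfold pvAddAlignmentPattern pvAlignKV pvApplyW
  dsimp only
  rw [List.map_flatMap]
  rw [pvFoldl_flatMap]
  simp only [List.map_map, List.foldl_map]
  rfl

lemma pvDict_get_foldl (kvs : List ((Int × Int) × Int)) (k : Int × Int) :
    (kvs.foldl (fun d kv => d.insert kv.1 kv.2) (PySem.Dict.empty : PySem.Dict (Int × Int) Int)).get? k
      = (kvs.reverse.find? (fun kv => kv.1 == k)).map (·.2) := by
  induction kvs using List.reverseRecOn with
  | nil => simp [PySem.Dict.empty, PySem.Dict.get?]
  | append_singleton t kv ih =>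
    rw [List.foldl_append]
    simp only [List.foldl_cons, List.foldl_nil]
    rw [PySem.Dict.get?_insert, List.reverse_append]
    simp only [List.reverse_cons, List.reverse_nil, List.nil_append, List.singleton_append,
      List.find?_cons]
    by_cases hk : k = kv.1
    · simp [hk]
    · have hb : (kv.1 == k) = false := by simp [Ne.symm hk]
      rw [if_neg hk, hb, ih]

-- the kv-list B's overlay inserts (and, via pvToTriple, the writes of A's alignment stamps)
def pvKVs (version size : Int) : List ((Int × Int) × Int) :=
  if version ≥ 2 then (pvAlignmentCenters version size).flatMap pvAlignKV else []

def pvFindPred (i j : Int) : ((Int × Int) × Int) → Bool := fun kv => kv.1 == (i, j)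

def pvFinderPred (i j : Int) : (Int × Int) → Bool := fun fp =>
  decide (0 ≤ i - fp.1 ∧ i - fp.1 ≤ 6 ∧ 0 ≤ j - fp.2 ∧ j - fp.2 ≤ 6 ∧
    (i - fp.1 = 0 ∨ i - fp.1 = 6 ∨ j - fp.2 = 0 ∨ j - fp.2 = 6 ∨
      (2 ≤ i - fp.1 ∧ i - fp.1 ≤ 4 ∧ 2 ≤ j - fp.2 ∧ j - fp.2 ≤ 4)))

def pvCell (version size i j : Int) : Int :=
  match ((pvKVs version size).reverse.find? (pvFindPred i j)).map (·.2) with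
  | some v => v
  | none =>
    match ([(0, 0), (size - 7, 0), (0, size - 7)] : List (Int × Int)).find? (pvFinderPred i j) with
    | some _ => 1
    | none => 0

lemma pvOverlay_fold (version size : Int) :
    (if version ≥ 2 then
      (pvAlignmentCenters version size).foldl (fun d c =>
        (PySem.List.pyRange 0 5 1).foldl (fun d di =>
          (PySem.List.pyRange 0 5 1).foldl (fun d dj =>
            d.insert (c.1 - 2 + di, c.2 - 2 + dj)
              (PySem.List.pyGetD (PySem.List.pyGetD pvAlignPattern di []) dj 0)) d) d)
        PySem.Dict.empty
    else PySem.Dict.empty)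
      = (pvKVs version size).foldl (fun d kv => d.insert kv.1 kv.2) PySem.Dict.empty := by
  unfold pvKVs
  by_cases h : version ≥ 2
  · rw [if_pos h, if_pos h]
    rw [pvFoldl_flatMap]
    apply PySem.List.foldl_congr_mem
    intro d c _
    unfold pvAlignKV
    rw [pvFoldl_flatMap]
    simp only [List.foldl_map]
  · rw [if_neg h, if_neg h]
    rfl

set_option maxRecDepth 100000 in
lemma pvAlt_eq (version : Int) (hv : ¬ version < 1) :
    generate_qr_code_mask_alt version =
      (PySem.List.pyRange 0 (version * 4 + 17) 1).map (fun i =>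
        (PySem.List.pyRange 0 (version * 4 + 17) 1).map (fun j =>
          pvCell version (version * 4 + 17) i j)) := by
  unfold generate_qr_code_mask_alt
  rw [if_neg hv]
  dsimp only
  rw [pvOverlay_fold]
  simp only [pvDict_get_foldl]
  simp only [pvCell]
  rfl

lemma pvOverlap (x y fx fy : Int) :
    ((PySem.List.pyRange 0 5 1).any (fun i =>
      (PySem.List.pyRange 0 5 1).any (fun j =>
        decide ((x + i, y + j) ∈
          (PySem.List.pyRange 0 7 1).flatMap (fun dx =>
            (PySem.List.pyRange 0 7 1).map (fun dy => (fx + dx, fy + dy)))))))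
      = decide (fx - 4 ≤ x ∧ x ≤ fx + 6 ∧ fy - 4 ≤ y ∧ y ≤ fy + 6) := by
  rw [Bool.eq_iff_iff]
  simp only [List.any_eq_true, decide_eq_true_eq, List.mem_flatMap, List.mem_map,
    PySem.List.mem_pyRange_one, Prod.ext_iff]
  constructor
  · rintro ⟨i, hi, j, hj, dx, hdx, dy, hdy, h1, h2⟩
    omega
  · rintro ⟨h1, h2, h3, h4⟩
    refine ⟨if x ≤ fx then fx - x else 0, by split_ifs <;> omega,
      if y ≤ fy then fy - y else 0, by split_ifs <;> omega,
      if x ≤ fx then 0 else x - fx, by split_ifs <;> omega,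
      if y ≤ fy then 0 else y - fy, by split_ifs <;> omega, ?_, ?_⟩ <;> split_ifs <;> omega

lemma pvFilter_eq (x y w : Int) :
    pvIsAlignmentWithinFinder (x, y) w =
      !(([(0, 0), (0, w - 7), (w - 7, 0)] : List (Int × Int)).any (fun fp =>
        decide (fp.1 - 4 ≤ x ∧ x ≤ fp.1 + 6 ∧ fp.2 - 4 ≤ y ∧ y ≤ fp.2 + 6))) := by
  unfold pvIsAlignmentWithinFinder
  simp only [List.any_cons, List.any_nil]
  rw [pvOverlap, pvOverlap, pvOverlap]

lemma pvPositions_eq (version : Int) :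
    pvGetAlignmentPositions version = pvAlignmentCenters version (version * 4 + 17) := by
  unfold pvGetAlignmentPositions pvAlignmentCenters
  by_cases h : version > 1
  · simp only [if_pos h]
    rw [PySem.List.foldl_append_if_eq_filter, List.nil_append, List.filter_flatMap]
    have e1 : 17 + 4 * version = version * 4 + 17 := by ring
    have e2 : version * 4 + 17 - 1 - 6 = version * 4 + 17 - 7 := by ring
    rw [e1, e2]
    simp only [List.singleton_append, List.filter_map]
    congr 1
    funext a
    congr 1
    apply List.filter_congr
    intro b _
    simp only [Function.comp_apply]
    rw [pvFilter_eq a b (version * 4 + 17)]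
  · simp only [if_neg h]
    rfl

set_option maxRecDepth 100000 in
lemma pvA_eq (version : Int) :
    generate_qr_code_mask version =
      pvApplyW
        (List.replicate (version * 4 + 17).toNat (List.replicate (version * 4 + 17).toNat 0))
        (pvFinderW 0 0 ++ (pvFinderW ((version * 4 + 17) - 7) 0 ++ (pvFinderW 0 ((version * 4 + 17) - 7)
          ++ ((pvKVs version (version * 4 + 17)).map pvToTriple)))) := by
  unfold generate_qr_code_mask pvKVs
  rw [pvApplyW_append, pvApplyW_append, pvApplyW_append]
  rw [← pvAddFinder_eq, ← pvAddFinder_eq, ← pvAddFinder_eq]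
  by_cases h : version ≥ 2
  · rw [if_pos h, if_pos h]
    rw [pvPositions_eq]
    rw [show ∀ (M : List (List Int)) (C : List (Int × Int)),
        pvApplyW M ((C.flatMap pvAlignKV).map pvToTriple)
          = C.foldl (fun m c => pvApplyW m ((pvAlignKV c).map pvToTriple)) M from
      fun M C => by rw [List.map_flatMap]; unfold pvApplyW; rw [pvFoldl_flatMap]]
    apply PySem.List.foldl_congr_mem
    intro acc c _
    exact pvAddAlign_eq acc c.1 c.2
  · rw [if_neg h, if_neg h]
    simp only [List.map_nil]
    rw [show ∀ m : List (List Int), pvApplyW m [] = m from fun _ => rfl]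

lemma pvG2_init (n p q : Nat) :
    pvG2 (List.replicate n (List.replicate n (0 : Int))) p q = 0 := by
  unfold pvG2
  rcases lt_or_ge p n with h | h
  · rw [List.getD_replicate _ h]
    rcases lt_or_ge q n with h' | h'
    · rw [List.getD_replicate _ h']
    · have : (List.replicate n (0 : Int)).getD q 0 = 0 := by
        rw [List.getD_eq_getElem?_getD, List.getElem?_eq_none (by simpa using h')]
        rfl
      exact this
  · have hrow0 : (List.replicate n (List.replicate n (0 : Int))).getD p [] = [] := by
      rw [List.getD_eq_getElem?_getD, List.getElem?_eq_none (by simpa using h)]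
      rfl
    rw [hrow0]
    rfl

lemma pvRect_init (n : Nat) : pvRect n (List.replicate n (List.replicate n (0 : Int))) := by
  refine ⟨by simp, ?_⟩
  intro p hp
  rw [List.getD_replicate _ hp]
  simp

lemma pvFinderW_val (x y : Int) : ∀ w ∈ pvFinderW x y, w.2.2 = 1 := by
  intro w hw
  unfold pvFinderW at hw
  simp only [List.mem_append, List.mem_flatMap, List.mem_map, PySem.List.mem_pyRange_one] at hw
  rcases hw with ⟨i, _, hmem⟩ | ⟨i, _, j, _, rfl⟩
  · simp only [List.mem_cons, List.not_mem_nil, or_false] at hmem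
    rcases hmem with rfl | rfl | rfl | rfl <;> rfl
  · rfl

lemma pvFinderW_hit (x y i j : Int) :
    (∃ w ∈ pvFinderW x y, i = w.1 ∧ j = w.2.1) ↔ pvFinderCond x y i j := by
  unfold pvFinderW pvFinderCond
  simp only [List.mem_append, List.mem_flatMap, List.mem_map, PySem.List.mem_pyRange_one,
    List.mem_cons, List.not_mem_nil, or_false]
  constructor
  · rintro ⟨w, hw, hi, hj⟩
    rcases hw with ⟨a, ha, hmem⟩ | ⟨a, ha, b, hb, rfl⟩
    · rcases hmem with rfl | rfl | rfl | rfl <;> (dsimp only at hi hj; omega)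
    · dsimp only at hi hj; omega
  · rintro ⟨h1, h2, h3, h4, h5⟩
    have h5' : i = x ∨ i = x + 6 ∨ j = y ∨ j = y + 6 ∨
        (x + 2 ≤ i ∧ i ≤ x + 4 ∧ y + 2 ≤ j ∧ j ≤ y + 4) := by omega
    rcases h5' with h5' | h5' | h5' | h5' | h5'
    · exact ⟨(x, y + (j - y), 1), Or.inl ⟨j - y, by omega, by simp⟩,
        by show i = x; omega, by show j = y + (j - y); omega⟩
    · exact ⟨(x + 6, y + (j - y), 1), Or.inl ⟨j - y, by omega, by simp⟩,
        by show i = x + 6; omega, by show j = y + (j - y); omega⟩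
    · exact ⟨(x + (i - x), y, 1), Or.inl ⟨i - x, by omega, by simp⟩,
        by show i = x + (i - x); omega, by show j = y; omega⟩
    · exact ⟨(x + (i - x), y + 6, 1), Or.inl ⟨i - x, by omega, by simp⟩,
        by show i = x + (i - x); omega, by show j = y + 6; omega⟩
    · exact ⟨(x + (i - x), y + (j - y), 1), Or.inr ⟨i - x, by omega, j - y, by omega, rfl⟩,
        by show i = x + (i - x); omega, by show j = y + (j - y); omega⟩

lemma pvFinderW_bounds (N : Nat) (x y : Int) (hx0 : 0 ≤ x) (hx : x + 7 ≤ (N : Int))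
    (hy0 : 0 ≤ y) (hy : y + 7 ≤ (N : Int)) : pvInW N (pvFinderW x y) := by
  intro w hw
  unfold pvFinderW at hw
  simp only [List.mem_append, List.mem_flatMap, List.mem_map, PySem.List.mem_pyRange_one,
    List.mem_cons, List.not_mem_nil, or_false] at hw
  rcases hw with ⟨a, ha, hmem⟩ | ⟨a, ha, b, hb, rfl⟩
  · rcases hmem with rfl | rfl | rfl | rfl <;> (dsimp only; omega)
  · dsimp only; omega

lemma pvAlignKV_key (c : Int × Int) :
    ∀ kv ∈ pvAlignKV c, c.1 - 2 ≤ kv.1.1 ∧ kv.1.1 ≤ c.1 + 2 ∧ c.2 - 2 ≤ kv.1.2 ∧ kv.1.2 ≤ c.2 + 2 := by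
  intro kv hkv
  unfold pvAlignKV at hkv
  simp only [List.mem_flatMap, List.mem_map, PySem.List.mem_pyRange_one] at hkv
  obtain ⟨a, ha, b, hb, rfl⟩ := hkv
  dsimp only
  omega

lemma pvBand_even (x : Int) (h0 : 0 ≤ x) (he : x % 2 = 0) : PySem.Int.band x (-2) = x := by
  simp [PySem.Int.band, h0]
  omega

set_option maxRecDepth 8000 in
lemma pvFact_small :
    ∀ v ∈ Finset.Icc (2 : Int) 335,
      1 ≤ pvStepE v (4 * v + 10) ∧ 2 ≤ pvSecondE v (4 * v + 10) := by decide

lemma pvFact_big (v last : Int) (h : 336 ≤ v) (hl : last = 4 * v + 10) :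
    pvStepE v last = 28 ∧ pvSecondE v last = 4 * (v % 7) + 10 := by
  have h7 : (0 : Int) < 7 := by norm_num
  set m := v / 7 + 1 with hm
  have hnp : pvNPat v = m + 1 := by
    unfold pvNPat
    rw [PySem.Int.floordiv_eq_ediv_of_pos h7]
    omega
  have hm49 : 49 ≤ m := by omega
  set r := v % 7 with hr
  have hv : v = 7 * (m - 1) + r := by omega
  have hL : last = 28 * m + 4 * r - 18 := by omega
  have he1 : pvNPat v - 2 = m - 1 := by omega
  have he2 : pvNPat v - 1 = m := by omega
  have hh : PySem.Int.floordiv (pvNPat v - 1) 2 = m / 2 := by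
    rw [he2, PySem.Int.floordiv_eq_ediv_of_pos (by norm_num)]
  have hQ : PySem.Int.floordiv
      (6 + last * (pvNPat v - 2) + PySem.Int.floordiv (pvNPat v - 1) 2) (pvNPat v - 1)
        = 28 * m + 4 * r - 46 := by
    rw [hh, he1, he2, PySem.Int.floordiv_eq_ediv_of_pos (by omega)]
    have hNum : 6 + last * (m - 1) + m / 2 = (24 - 4 * r + m / 2) + (28 * m + 4 * r - 46) * m := by
      linear_combination (m - 1) * hL
    rw [hNum, Int.add_mul_ediv_right _ _ (by omega : m ≠ 0),
      Int.ediv_eq_zero_of_lt (by omega) (by omega)]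
    ring
  have hband : PySem.Int.band (28 * m + 4 * r - 46) (-2) = 28 * m + 4 * r - 46 :=
    pvBand_even _ (by omega) (by omega)
  have hstep : pvStepE v last = 28 := by
    unfold pvStepE pvSLP
    rw [hQ, hband]
    omega
  refine ⟨hstep, ?_⟩
  unfold pvSecondE
  rw [hstep, he1]
  omega

lemma pvFact (version last : Int) (h2 : 2 ≤ version) (hl : last = 4 * version + 10) :
    1 ≤ pvStepE version last ∧ 2 ≤ pvSecondE version last := by
  rcases lt_or_ge version 336 with hs | hb
  · have := pvFact_small version (by simp only [Finset.mem_Icc]; omega)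
    rw [hl]
    exact this
  · obtain ⟨h1', h2'⟩ := pvFact_big version last hb hl
    constructor <;> omega

lemma pvCoords_mem (version size : Int) (h2 : 2 ≤ version) (hs : size = version * 4 + 17) :
    ∀ z ∈ (6 :: PySem.List.pyRange (pvSecondE version (size - 7)) ((size - 7) + 1)
        (pvStepE version (size - 7))),
      2 ≤ z ∧ z ≤ size - 7 := by
  obtain ⟨hstep, hsec⟩ := pvFact version (size - 7) h2 (by omega)
  intro z hz
  rcases List.mem_cons.mp hz with rfl | hz
  · omega
  · obtain ⟨hz1, hz2, -⟩ := (PySem.List.mem_pyRange_iff_of_pos (by omega) z).mp hz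
    omega

lemma pvCenters_bounds (version size : Int) (h2 : 2 ≤ version) (hs : size = version * 4 + 17) :
    ∀ c ∈ pvAlignmentCenters version size,
      2 ≤ c.1 ∧ c.1 ≤ size - 3 ∧ 2 ≤ c.2 ∧ c.2 ≤ size - 3 := by
  intro c hc
  unfold pvAlignmentCenters at hc
  rw [if_pos (by omega : version > 1)] at hc
  dsimp only at hc
  simp only [List.mem_flatMap, List.mem_map, List.mem_filter] at hc
  obtain ⟨a, ha, b, ⟨hb, -⟩, rfl⟩ := hc
  have ha' := pvCoords_mem version size h2 hs a ha
  have hb' := pvCoords_mem version size h2 hs b hb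
  dsimp only
  omega

lemma pvALT_find (kvs : List ((Int × Int) × Int)) (p q : Nat) :
    ((kvs.map pvToTriple).reverse).find? (pvHit p q)
      = (kvs.reverse.find? (pvFindPred (p : Int) (q : Int))).map pvToTriple := by
  rw [← List.map_reverse, List.find?_map]
  have hfun : (pvHit p q ∘ pvToTriple) = pvFindPred (p : Int) (q : Int) := by
    funext kv
    rcases kv with ⟨⟨a, b⟩, v⟩
    simp only [Function.comp_apply]
    rw [Bool.eq_iff_iff]
    simp only [pvHit, pvToTriple, pvFindPred, decide_eq_true_eq, beq_iff_eq, Prod.mk.injEq]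
    omega
  rw [hfun]

lemma pvFindFW_none (x y : Int) (p q : Nat) :
    ((pvFinderW x y).reverse.find? (pvHit p q) = none) ↔ ¬ pvFinderCond x y (p : Int) (q : Int) := by
  rw [List.find?_eq_none]
  constructor
  · intro h hcond
    obtain ⟨w, hw, h1, h2⟩ := (pvFinderW_hit x y (p : Int) (q : Int)).mpr hcond
    exact h w (List.mem_reverse.mpr hw) (by unfold pvHit; simp [h1, h2])
  · intro h w hw hp
    apply h
    apply (pvFinderW_hit x y (p : Int) (q : Int)).mp
    refine ⟨w, List.mem_reverse.mp hw, ?_⟩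
    unfold pvHit at hp
    exact of_decide_eq_true hp

lemma pvFindFW_cond (x y : Int) (p q : Nat) (w : Int × Int × Int)
    (h : (pvFinderW x y).reverse.find? (pvHit p q) = some w) :
    pvFinderCond x y (p : Int) (q : Int) ∧ w.2.2 = 1 := by
  have hmem := List.mem_reverse.mp (List.mem_of_find?_eq_some h)
  have hpred := List.find?_some h
  unfold pvHit at hpred
  exact ⟨(pvFinderW_hit x y (p : Int) (q : Int)).mp ⟨w, hmem, of_decide_eq_true hpred⟩,
    pvFinderW_val x y w hmem⟩

lemma pvFinder3 (size i j : Int) :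
    (match ([(0, 0), (size - 7, 0), (0, size - 7)] : List (Int × Int)).find? (pvFinderPred i j) with
      | some _ => (1 : Int)
      | none => 0)
      = if pvFinderCond 0 0 i j ∨ pvFinderCond (size - 7) 0 i j ∨ pvFinderCond 0 (size - 7) i j
        then 1 else 0 := by
  by_cases h1 : pvFinderCond 0 0 i j
  · rw [List.find?_cons_of_pos (show pvFinderPred i j (0, 0) = true from decide_eq_true h1),
      if_pos (Or.inl h1)]
  · rw [List.find?_cons_of_neg (show ¬ pvFinderPred i j (0, 0) = true from fun hx => h1 (of_decide_eq_true hx))]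
    by_cases h2 : pvFinderCond (size - 7) 0 i j
    · rw [List.find?_cons_of_pos (show pvFinderPred i j (size - 7, 0) = true from decide_eq_true h2),
        if_pos (Or.inr (Or.inl h2))]
    · rw [List.find?_cons_of_neg (show ¬ pvFinderPred i j (size - 7, 0) = true from fun hx => h2 (of_decide_eq_true hx))]
      by_cases h3 : pvFinderCond 0 (size - 7) i j
      · rw [List.find?_cons_of_pos (show pvFinderPred i j (0, size - 7) = true from decide_eq_true h3),
          if_pos (Or.inr (Or.inr h3))]
      · rw [List.find?_cons_of_neg (show ¬ pvFinderPred i j (0, size - 7) = true from fun hx => h3 (of_decide_eq_true hx)),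
          List.find?_nil,
          if_neg (by intro hor; rcases hor with h | h | h; exacts [h1 h, h2 h, h3 h])]

set_option maxHeartbeats 2000000 in
set_option maxRecDepth 100000 in
lemma pvCellEq (version szI : Int) (N : Nat) (hszI : szI = version * 4 + 17)
    (hpre : -2 ≤ version) (hNI : (N : Int) = szI) (p q : Nat) :
    pvG2 (pvApplyW (List.replicate N (List.replicate N 0))
      (pvFinderW 0 0 ++ (pvFinderW (szI - 7) 0 ++ (pvFinderW 0 (szI - 7)
        ++ (pvKVs version szI).map pvToTriple)))) p q
      = pvCell version szI (p : Int) (q : Int) := by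
  have h9 : (9 : Int) ≤ szI := by omega
  have hb1 : pvInW N (pvFinderW 0 0) :=
    pvFinderW_bounds N 0 0 (by omega) (by omega) (by omega) (by omega)
  have hb2 : pvInW N (pvFinderW (szI - 7) 0) :=
    pvFinderW_bounds N (szI - 7) 0 (by omega) (by omega) (by omega) (by omega)
  have hb3 : pvInW N (pvFinderW 0 (szI - 7)) :=
    pvFinderW_bounds N 0 (szI - 7) (by omega) (by omega) (by omega) (by omega)
  have hbA : pvInW N ((pvKVs version szI).map pvToTriple) := by
    intro w hw
    simp only [List.mem_map] at hw
    obtain ⟨kv, hkv, rfl⟩ := hw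
    unfold pvKVs at hkv
    split_ifs at hkv with hv2
    · simp only [List.mem_flatMap] at hkv
      obtain ⟨c, hcmem, hkv⟩ := hkv
      have hcb := pvCenters_bounds version szI (by omega) hszI c hcmem
      have hkb := pvAlignKV_key c kv hkv
      unfold pvToTriple
      dsimp only
      omega
    · simp at hkv
  have hWS : pvInW N (pvFinderW 0 0 ++ (pvFinderW (szI - 7) 0 ++ (pvFinderW 0 (szI - 7)
      ++ (pvKVs version szI).map pvToTriple))) := by
    intro w hw
    simp only [List.mem_append] at hw
    rcases hw with h | h | h | h
    exacts [hb1 w h, hb2 w h, hb3 w h, hbA w h]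
  rw [pvG2_applyW N _ _ (pvRect_init N) hWS p q]
  simp only [List.reverse_append]
  rw [List.find?_append, List.find?_append, List.find?_append]
  rw [pvALT_find]
  unfold pvCell
  cases hA : (pvKVs version szI).reverse.find? (pvFindPred (p : Int) (q : Int)) with
  | some kv =>
    simp only [Option.map_some, Option.some_or]
    rfl
  | none =>
    simp only [Option.map_none, Option.none_or]
    rw [pvFinder3]
    cases hf3 : (pvFinderW 0 (szI - 7)).reverse.find? (pvHit p q) with
    | some w3 =>
      obtain ⟨hc3, hv3⟩ := pvFindFW_cond _ _ _ _ _ hf3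
      simp only [Option.some_or]
      rw [if_pos (Or.inr (Or.inr hc3))]
      exact hv3
    | none =>
      simp only [Option.none_or]
      cases hf2 : (pvFinderW (szI - 7) 0).reverse.find? (pvHit p q) with
      | some w2 =>
        obtain ⟨hc2, hv2⟩ := pvFindFW_cond _ _ _ _ _ hf2
        simp only [Option.some_or]
        rw [if_pos (Or.inr (Or.inl hc2))]
        exact hv2
      | none =>
        simp only [Option.none_or]
        cases hf1 : (pvFinderW 0 0).reverse.find? (pvHit p q) with
        | some w1 =>
          obtain ⟨hc1, hv1⟩ := pvFindFW_cond _ _ _ _ _ hf1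
          rw [if_pos (Or.inl hc1)]
          exact hv1
        | none =>
          rw [pvG2_init, if_neg ?_]
          rintro (h | h | h)
          exacts [(pvFindFW_none 0 0 p q).mp hf1 h, (pvFindFW_none (szI - 7) 0 p q).mp hf2 h,
            (pvFindFW_none 0 (szI - 7) p q).mp hf3 h]

lemma pvMatrix_ext (A B : List (List Int)) (N : Nat) (hA : pvRect N A)
    (hBlen : B.length = N) (hBrow : ∀ p : Nat, p < N → (B.getD p []).length = N)
    (h : ∀ p q : Nat, p < N → q < N → pvG2 A p q = pvG2 B p q) : A = B := by
  apply List.ext_getElem (by rw [hA.1, hBlen])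
  intro p hp hp'
  have hpN : p < N := by rw [hA.1] at hp; exact hp
  have hAp : A[p] = A.getD p [] := (List.getD_eq_getElem A [] hp).symm
  have hBp : B[p] = B.getD p [] := (List.getD_eq_getElem B [] hp').symm
  rw [hAp, hBp]
  apply List.ext_getElem (by rw [hA.2 p hpN, hBrow p hpN])
  intro q hq hq'
  have hqN : q < N := by rw [hA.2 p hpN] at hq; exact hq
  have h1 : (A.getD p [])[q] = (A.getD p []).getD q 0 := (List.getD_eq_getElem _ 0 hq).symm
  have h2 : (B.getD p [])[q] = (B.getD p []).getD q 0 := (List.getD_eq_getElem _ 0 hq').symm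
  rw [h1, h2]
  exact h p q hpN hqN

set_option maxHeartbeats 2000000 in
set_option maxRecDepth 100000 in
lemma pvMain (version : Int) (hpre : 1 ≤ version) :
    generate_qr_code_mask version = generate_qr_code_mask_alt version := by
  have h9 : (9 : Int) ≤ version * 4 + 17 := by omega
  rw [pvA_eq, pvAlt_eq version (by omega)]
  set szI := version * 4 + 17 with hszI
  set N := szI.toNat with hNdef
  have hNI : (N : Int) = szI := by omega
  have hb1 : pvInW N (pvFinderW 0 0) :=
    pvFinderW_bounds N 0 0 (by omega) (by omega) (by omega) (by omega)
  have hb2 : pvInW N (pvFinderW (szI - 7) 0) :=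
    pvFinderW_bounds N (szI - 7) 0 (by omega) (by omega) (by omega) (by omega)
  have hb3 : pvInW N (pvFinderW 0 (szI - 7)) :=
    pvFinderW_bounds N 0 (szI - 7) (by omega) (by omega) (by omega) (by omega)
  have hbA : pvInW N ((pvKVs version szI).map pvToTriple) := by
    intro w hw
    simp only [List.mem_map] at hw
    obtain ⟨kv, hkv, rfl⟩ := hw
    unfold pvKVs at hkv
    split_ifs at hkv with hv2
    · simp only [List.mem_flatMap] at hkv
      obtain ⟨c, hcmem, hkv⟩ := hkv
      have hcb := pvCenters_bounds version szI (by omega) hszI c hcmem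
      have hkb := pvAlignKV_key c kv hkv
      unfold pvToTriple
      dsimp only
      omega
    · simp at hkv
  have hWS : pvInW N (pvFinderW 0 0 ++ (pvFinderW (szI - 7) 0 ++ (pvFinderW 0 (szI - 7)
      ++ (pvKVs version szI).map pvToTriple))) := by
    intro w hw
    simp only [List.mem_append] at hw
    rcases hw with h | h | h | h
    exacts [hb1 w h, hb2 w h, hb3 w h, hbA w h]
  have hRect := pvRect_applyW N _ _ (pvRect_init N) hWS
  have hBshape : ((PySem.List.pyRange 0 szI 1).map (fun i =>
      (PySem.List.pyRange 0 szI 1).map (fun j => pvCell version szI i j)))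
        = (List.range N).map (fun p : Nat =>
            (List.range N).map (fun k : Nat => pvCell version szI (p : Int) (k : Int))) := by
    rw [PySem.List.pyRange_zero]
    simp only [List.map_map]
    rfl
  rw [hBshape]
  apply pvMatrix_ext _ _ N hRect
  · simp
  · intro p hp
    rw [List.getD_eq_getElem _ [] (by simpa using hp), List.getElem_map, List.getElem_range]
    simp
  · intro p q hp hq
    rw [pvCellEq version szI N hszI (by omega) hNI p q]
    unfold pvG2
    rw [List.getD_eq_getElem _ [] (by simpa using hp), List.getElem_map, List.getElem_range]
    rw [List.getD_eq_getElem _ 0 (by simpa using hq), List.getElem_map, List.getElem_range]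

-- ===== VERDICT (by name: the statement is the Claim_ definition above) =====
theorem generate_qr_code_mask_spec : Claim_equal_generate_qr_code_mask := by
  intro version _ hpre
  unfold Pre_generate_qr_code_mask at hpre
  unfold Spec_generate_qr_code_mask
  exact pvMain version hpre
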